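-- pv_equiv track=rewrite | github.com/mouredev/retos-programacion-2023 | Retos/Reto #2 - EL PARTIDO DE TENIS [Media]/python/egcdark.py | tenis_scores
-- ===== SOURCE A (Python) =====
-- points = {0:"love",1:15, 2:30, 3:40, 4:"Ventaja", 5:"Ha Ganado"}
--
-- def tenis_scores(scores: list) -> str:
--   P1, P2 = [], []
--   for i in range(len(scores)):
--     if i == 0:
--       if scores[i] == "P1":
--         P1.append(1)
--         P2.append(0)
--       else:
--         P1.append(0)
--         P2.append(1)
--     else:
--       if scores[i] == "P1":
--         P1.append(P1[i-1] + 1)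
--         P2.append(P2[i-1])
--       else:
--         P1.append(P1[i-1])
--         P2.append(P2[i-1] + 1)
--
--   return(result_pretty(P1, P2))
--
-- def result_pretty(P1_scores: list, P2_scores: list) -> list:
--   result = ["P1 - P2"]
--   for i in range(len(P1_scores)):
--     if points.get(P1_scores[i]) == 40 and points.get(P2_scores[i]) == 40:
--         result.append("Deuce")
--         continue
--     result.append(str(points.get(P1_scores[i])) + " - " + str(points.get(P2_scores[i])))
--
--   return '\n'.join(result)
-- ===== SOURCE B (Python) =====
-- points = {0:"love",1:15, 2:30, 3:40, 4:"Ventaja", 5:"Ha Ganado"}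
--
-- def tenis_scores(scores: list) -> str:
--   s1 = s2 = 0
--   result = ["P1 - P2"]
--   for s in scores:
--     if s == "P1":
--       s1 += 1
--     else:
--       s2 += 1
--     if s1 == 3 and s2 == 3:
--       result.append("Deuce")
--     else:
--       result.append(str(points.get(s1)) + " - " + str(points.get(s2)))
--   return '\n'.join(result)
-- ===== Notes on version B (the rewrite author's own statement) =====
-- stated objective: simpler
-- what changed: B replaces A's two-pass design (build two index-aligned score lists P1/P2 by indexing into the previous element, then a second formatting pass over indices) with a single left-to-right pass keeping two integer counters and formatting each line on the fly; no intermediate lists and no index arithmetic.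
import Mathlib
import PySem

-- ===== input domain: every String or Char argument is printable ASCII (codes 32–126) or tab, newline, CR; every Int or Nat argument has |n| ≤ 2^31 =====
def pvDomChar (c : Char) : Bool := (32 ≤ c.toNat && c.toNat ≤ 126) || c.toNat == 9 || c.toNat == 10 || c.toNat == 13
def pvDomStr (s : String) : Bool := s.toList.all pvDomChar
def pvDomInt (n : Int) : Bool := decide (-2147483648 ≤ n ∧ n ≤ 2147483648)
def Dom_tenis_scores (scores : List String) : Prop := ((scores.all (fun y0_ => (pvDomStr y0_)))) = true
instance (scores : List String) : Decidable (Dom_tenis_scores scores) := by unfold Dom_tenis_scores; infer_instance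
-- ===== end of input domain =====

-- B folds A's two passes (indexed score lists, then formatting) into one counter loop; objective: simpler.

-- ===== PORT A =====
-- str(points.get(n)) for points = {0:"love",1:15,2:30,3:40,4:"Ventaja",5:"Ha Ganado"}; missing key -> str(None) = "None".
def pvPointsStr (n : Int) : String :=
  if n = 0 then "love" else if n = 1 then "15" else if n = 2 then "30"
  else if n = 3 then "40" else if n = 4 then "Ventaja" else if n = 5 then "Ha Ganado" else "None"

-- 'points.get(k) == 40' is true exactly when k = 3 (40 is the value of key 3 only).
def result_pretty (P1_scores P2_scores : List Int) : String :=
  let result := (PySem.List.pyRange 0 (P1_scores.length : Int) 1).foldl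
    (fun result i =>
      if PySem.List.pyGetD P1_scores i 0 = 3 ∧ PySem.List.pyGetD P2_scores i 0 = 3 then
        result ++ ["Deuce"]
      else
        result ++ [pvPointsStr (PySem.List.pyGetD P1_scores i 0) ++ " - " ++
                   pvPointsStr (PySem.List.pyGetD P2_scores i 0)])
    ["P1 - P2"]
  PySem.Str.join "\n" result

def tenis_scores (scores : List String) : String :=
  let st := (PySem.List.pyRange 0 (scores.length : Int) 1).foldl
    (fun (st : List Int × List Int) i =>
      if i = 0 then
        if PySem.List.pyGetD scores i "" = "P1" then (st.1 ++ [1], st.2 ++ [0])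
        else (st.1 ++ [0], st.2 ++ [1])
      else
        if PySem.List.pyGetD scores i "" = "P1" then
          (st.1 ++ [PySem.List.pyGetD st.1 (i-1) 0 + 1], st.2 ++ [PySem.List.pyGetD st.2 (i-1) 0])
        else
          (st.1 ++ [PySem.List.pyGetD st.1 (i-1) 0], st.2 ++ [PySem.List.pyGetD st.2 (i-1) 0 + 1]))
    ([], [])
  result_pretty st.1 st.2

-- ===== PORT B =====
def tenis_scores_alt (scores : List String) : String :=
  let st := scores.foldl
    (fun (st : List String × Int × Int) s =>
      let s1 := if s = "P1" then st.2.1 + 1 else st.2.1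
      let s2 := if s = "P1" then st.2.2 else st.2.2 + 1
      if s1 = 3 ∧ s2 = 3 then (st.1 ++ ["Deuce"], s1, s2)
      else (st.1 ++ [pvPointsStr s1 ++ " - " ++ pvPointsStr s2], s1, s2))
    (["P1 - P2"], 0, 0)
  PySem.Str.join "\n" st.1

-- ===== PRECONDITION & SPEC =====
def Spec_tenis_scores (scores : List String) (out : String) : Prop := out = tenis_scores_alt scores
instance (scores : List String) (out : String) : Decidable (Spec_tenis_scores scores out) := by unfold Spec_tenis_scores; infer_instance

-- ===== CLAIM (what is proved, stated in full; the proofs are below) =====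
def Claim_equal_tenis_scores : Prop := ∀ (scores : List String), Dom_tenis_scores scores → Spec_tenis_scores scores (tenis_scores scores)

-- ===== LEMMAS AND PROOFS =====

/-- The successive (s1, s2) counter pairs after each point, starting from (s1, s2). -/
def pvRows (s1 s2 : Int) : List String → List (Int × Int)
  | [] => []
  | x :: xs =>
    let t1 := if x = "P1" then s1 + 1 else s1
    let t2 := if x = "P1" then s2 else s2 + 1
    (t1, t2) :: pvRows t1 t2 xs

/-- Final counters after consuming the whole list. -/
def pvFin (s1 s2 : Int) : List String → Int × Int
  | [] => (s1, s2)
  | x :: xs => if x = "P1" then pvFin (s1 + 1) s2 xs else pvFin s1 (s2 + 1) xs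

/-- One formatted line for a counter pair. -/
def pvFmt (p : Int × Int) : String :=
  if p.1 = 3 ∧ p.2 = 3 then "Deuce" else pvPointsStr p.1 ++ " - " ++ pvPointsStr p.2

theorem pvRows_length (xs : List String) : ∀ s1 s2, (pvRows s1 s2 xs).length = xs.length := by
  induction xs with
  | nil => intro _ _; rfl
  | cons x xs ih => intro s1 s2; simp [pvRows, ih]

theorem pvRows_snoc (xs : List String) : ∀ s1 s2 y,
    pvRows s1 s2 (xs ++ [y]) = pvRows s1 s2 xs ++
      [((if y = "P1" then (pvFin s1 s2 xs).1 + 1 else (pvFin s1 s2 xs).1),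
        (if y = "P1" then (pvFin s1 s2 xs).2 else (pvFin s1 s2 xs).2 + 1))] := by
  induction xs with
  | nil => intro s1 s2 y; simp [pvRows, pvFin]
  | cons x xs ih =>
    intro s1 s2 y
    by_cases hx : x = "P1" <;> simp [pvRows, pvFin, hx, ih]

theorem pvRows_getLast? (xs : List String) : ∀ s1 s2, xs ≠ [] →
    (pvRows s1 s2 xs).getLast? = some (pvFin s1 s2 xs) := by
  induction xs with
  | nil => intro _ _ h; exact absurd rfl h
  | cons x xs ih =>
    intro s1 s2 _
    by_cases hxs : xs = []
    · subst hxs; by_cases hx : x = "P1" <;> simp [pvRows, pvFin, hx]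
    · cases xs with
      | nil => exact absurd rfl hxs
      | cons z zs =>
        have h1 := ih (if x = "P1" then s1 + 1 else s1) (if x = "P1" then s2 else s2 + 1)
          (by simp)
        by_cases hx : x = "P1" <;>
          simp_all [pvRows, pvFin, List.getLast?_cons_cons]

/-- A's first loop produces exactly the fst- and snd-projections of the counter rows. -/
theorem pvAloop (xs : List String) :
    (PySem.List.pyRange 0 (xs.length : Int) 1).foldl
      (fun (st : List Int × List Int) i =>
        if i = 0 then
          if PySem.List.pyGetD xs i "" = "P1" then (st.1 ++ [1], st.2 ++ [0])
          else (st.1 ++ [0], st.2 ++ [1])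
        else
          if PySem.List.pyGetD xs i "" = "P1" then
            (st.1 ++ [PySem.List.pyGetD st.1 (i-1) 0 + 1], st.2 ++ [PySem.List.pyGetD st.2 (i-1) 0])
          else
            (st.1 ++ [PySem.List.pyGetD st.1 (i-1) 0], st.2 ++ [PySem.List.pyGetD st.2 (i-1) 0 + 1]))
      ([], [])
    = ((pvRows 0 0 xs).map Prod.fst, (pvRows 0 0 xs).map Prod.snd) := by
  induction xs using List.reverseRecOn with
  | nil => simp [PySem.List.pyRange_one_eq_nil, pvRows]
  | append_singleton ys y ih =>
    have hlen : (((ys ++ [y]).length : Nat) : Int) = (ys.length : Int) + 1 := by simp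
    rw [hlen, PySem.List.pyRange_one_succ_right (by positivity), List.foldl_append]
    have hcg := PySem.List.foldl_congr_mem (PySem.List.pyRange 0 (ys.length : Int) 1)
      (fun (st : List Int × List Int) i =>
        if i = 0 then
          if PySem.List.pyGetD (ys ++ [y]) i "" = "P1" then (st.1 ++ [1], st.2 ++ [0])
          else (st.1 ++ [0], st.2 ++ [1])
        else
          if PySem.List.pyGetD (ys ++ [y]) i "" = "P1" then
            (st.1 ++ [PySem.List.pyGetD st.1 (i-1) 0 + 1], st.2 ++ [PySem.List.pyGetD st.2 (i-1) 0])
          else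
            (st.1 ++ [PySem.List.pyGetD st.1 (i-1) 0], st.2 ++ [PySem.List.pyGetD st.2 (i-1) 0 + 1]))
      (fun (st : List Int × List Int) i =>
        if i = 0 then
          if PySem.List.pyGetD ys i "" = "P1" then (st.1 ++ [1], st.2 ++ [0])
          else (st.1 ++ [0], st.2 ++ [1])
        else
          if PySem.List.pyGetD ys i "" = "P1" then
            (st.1 ++ [PySem.List.pyGetD st.1 (i-1) 0 + 1], st.2 ++ [PySem.List.pyGetD st.2 (i-1) 0])
          else
            (st.1 ++ [PySem.List.pyGetD st.1 (i-1) 0], st.2 ++ [PySem.List.pyGetD st.2 (i-1) 0 + 1]))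
      (([], []) : List Int × List Int)
      (by
        intro acc i hi
        rcases (PySem.List.mem_pyRange_one).mp hi with ⟨h0, h1⟩
        have hget : PySem.List.pyGetD (ys ++ [y]) i "" = PySem.List.pyGetD ys i "" := by
          rw [PySem.List.pyGetD_eq_getElem (ys ++ [y]) "" h0 (by simp; omega),
              PySem.List.pyGetD_eq_getElem ys "" h0 h1,
              List.getElem_append_left (by omega)]
        simp only [hget])
    rw [hcg, ih]
    -- the final iteration, at index i = ys.length
    rcases List.eq_nil_or_concat' ys with hnil | ⟨zs, z, hz⟩
    · subst hnil
      by_cases hy : y = "P1" <;>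
        simp [pvRows, PySem.List.pyGetD_zero_cons, hy]
    · have hpos : 0 < ys.length := by subst hz; simp
      have hne : ys ≠ [] := by intro h; rw [h] at hpos; simp at hpos
      have hi0 : ((ys.length : Int)) ≠ 0 := by exact_mod_cast hpos.ne'
      have hgy : PySem.List.pyGetD (ys ++ [y]) (ys.length : Int) "" = y := by
        rw [PySem.List.pyGetD_eq_getElem (ys ++ [y]) "" (by positivity) (by simp)]
        simp
      have hlenR : (pvRows 0 0 ys).length = ys.length := pvRows_length ys 0 0
      have hRne : pvRows 0 0 ys ≠ [] := by
        intro h; rw [h] at hlenR; simp at hlenR; omega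
      have hlast : (pvRows 0 0 ys).getLast hRne = pvFin 0 0 ys := by
        have := pvRows_getLast? ys 0 0 hne
        rwa [List.getLast?_eq_some_getLast hRne, Option.some_inj] at this
      have hg1 : PySem.List.pyGetD ((pvRows 0 0 ys).map Prod.fst) ((ys.length : Int) - 1) 0
          = (pvFin 0 0 ys).1 := by
        rw [PySem.List.pyGetD_eq_getElem _ 0 (by omega) (by simp; omega)]
        have ht : ((ys.length : Int) - 1).toNat = (pvRows 0 0 ys).length - 1 := by omega
        simp only [List.getElem_map, ht]
        rw [← List.getLast_eq_getElem, hlast]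
        exact hRne
      have hg2 : PySem.List.pyGetD ((pvRows 0 0 ys).map Prod.snd) ((ys.length : Int) - 1) 0
          = (pvFin 0 0 ys).2 := by
        rw [PySem.List.pyGetD_eq_getElem _ 0 (by omega) (by simp; omega)]
        have ht : ((ys.length : Int) - 1).toNat = (pvRows 0 0 ys).length - 1 := by omega
        simp only [List.getElem_map, ht]
        rw [← List.getLast_eq_getElem, hlast]
        exact hRne
      by_cases hy : y = "P1" <;>
        simp [hgy, hy, hg1, hg2, pvRows_snoc, hne]

/-- A's formatting pass over the two projections is the map of pvFmt. -/
theorem pvPretty (R : List (Int × Int)) :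
    result_pretty (R.map Prod.fst) (R.map Prod.snd) = PySem.Str.join "\n" ("P1 - P2" :: R.map pvFmt) := by
  unfold result_pretty
  simp only [List.length_map]
  have hcg := PySem.List.foldl_congr_mem (PySem.List.pyRange 0 (R.length : Int) 1)
    (fun (result : List String) i =>
      if PySem.List.pyGetD (R.map Prod.fst) i 0 = 3 ∧ PySem.List.pyGetD (R.map Prod.snd) i 0 = 3 then
        result ++ ["Deuce"]
      else
        result ++ [pvPointsStr (PySem.List.pyGetD (R.map Prod.fst) i 0) ++ " - " ++
                   pvPointsStr (PySem.List.pyGetD (R.map Prod.snd) i 0)])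
    (fun (acc : List String) i =>
      acc ++ [pvFmt (PySem.List.pyGetD R i ((0:Int), (0:Int)))])
    ["P1 - P2"]
    (by
      have e1 : ∀ i : Int, PySem.List.pyGetD (R.map Prod.fst) i 0 = (PySem.List.pyGetD R i ((0:Int), (0:Int))).1 :=
        fun i => PySem.List.pyGetD_map Prod.fst R i ((0:Int), (0:Int))
      have e2 : ∀ i : Int, PySem.List.pyGetD (R.map Prod.snd) i 0 = (PySem.List.pyGetD R i ((0:Int), (0:Int))).2 :=
        fun i => PySem.List.pyGetD_map Prod.snd R i ((0:Int), (0:Int))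
      intro acc i _
      simp only [e1, e2]
      unfold pvFmt
      split_ifs <;> simp_all)
  rw [hcg,
      PySem.List.foldl_pyRange_zero_pyGetD' R ((0:Int), (0:Int))
        (fun acc p => acc ++ [pvFmt p]) ["P1 - P2"],
      PySem.List.foldl_append_singleton_eq_map]
  rfl

/-- One step of B's loop appends one formatted line and updates the counters. -/
theorem pvStep (r : List String) (s1 s2 : Int) (x : String) :
    (let t1 := if x = "P1" then (r, s1, s2).2.1 + 1 else (r, s1, s2).2.1
     let t2 := if x = "P1" then (r, s1, s2).2.2 else (r, s1, s2).2.2 + 1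
     if t1 = 3 ∧ t2 = 3 then ((r, s1, s2).1 ++ ["Deuce"], t1, t2)
     else ((r, s1, s2).1 ++ [pvPointsStr t1 ++ " - " ++ pvPointsStr t2], t1, t2))
    = (r ++ [pvFmt ((if x = "P1" then s1 + 1 else s1), (if x = "P1" then s2 else s2 + 1))],
       (if x = "P1" then s1 + 1 else s1), (if x = "P1" then s2 else s2 + 1)) := by
  simp only []
  unfold pvFmt
  split_ifs <;> simp_all

/-- B's loop accumulates the pvFmt lines of the rows. -/
theorem pvBloop (xs : List String) : ∀ (r : List String) (s1 s2 : Int),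
    (xs.foldl
      (fun (st : List String × Int × Int) s =>
        let t1 := if s = "P1" then st.2.1 + 1 else st.2.1
        let t2 := if s = "P1" then st.2.2 else st.2.2 + 1
        if t1 = 3 ∧ t2 = 3 then (st.1 ++ ["Deuce"], t1, t2)
        else (st.1 ++ [pvPointsStr t1 ++ " - " ++ pvPointsStr t2], t1, t2))
      (r, s1, s2)).1 = r ++ (pvRows s1 s2 xs).map pvFmt := by
  induction xs with
  | nil => intro r s1 s2; simp [pvRows]
  | cons x xs ih =>
    intro r s1 s2
    rw [List.foldl_cons, pvStep, ih]
    simp [pvRows, List.append_assoc]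

-- ===== VERDICT (by name: the statement is the Claim_ definition above) =====
theorem tenis_scores_spec : Claim_equal_tenis_scores := by
  intro scores _
  show tenis_scores scores = tenis_scores_alt scores
  have hA := pvAloop scores
  have hB := pvBloop scores ["P1 - P2"] 0 0
  simp only [tenis_scores, tenis_scores_alt, hA, hB]
  rw [pvPretty (pvRows 0 0 scores)]
  rfl
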